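-- pv_equiv track=rewrite | github.com/MrBrantCode/unitest_baseline | mut_generate/mist_train_taco/taco_1338/solution.py | count_magic_fractions
-- ===== SOURCE A (Python) =====
-- def count_magic_fractions(N):
--     primes = [2, 3, 5, 7, 11, 13, 17, 19, 23, 29, 31, 37, 41, 43, 47, 53, 59, 61, 67, 71, 73, 79, 83, 89, 97, 101, 103, 107, 109, 113, 127, 131, 137, 139, 149, 151, 157, 163, 167, 173, 179, 181, 191, 193, 197, 199, 211, 223, 227, 229, 233, 239, 241, 251, 257, 263, 269, 271, 277, 281, 283, 293, 307, 311, 313, 317, 331, 337, 347, 349, 353, 359, 367, 373, 379, 383, 389, 397, 401, 409, 419, 421, 431, 433, 439, 443, 449, 457, 461, 463, 467, 479, 487, 491, 499]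
--
--     ans = [0] * (N + 1)
--
--     if N > 1:
--         ans[2] = 1
--         for i in range(3, N + 1):
--             if i in primes:
--                 ans[i] = ans[i - 1] * 2
--             else:
--                 ans[i] = ans[i - 1]
--
--     total_magic_fractions = sum(ans)
--     return total_magic_fractions
-- ===== SOURCE B (Python) =====
-- def count_magic_fractions(N):
--     # Piecewise-constant sum: between consecutive primes the per-i value is
--     # constant, so add value * segment_length per prime segment. O(P) vs A's O(N*P).
--     primes = [2, 3, 5, 7, 11, 13, 17, 19, 23, 29, 31, 37, 41, 43, 47, 53, 59, 61, 67, 71, 73, 79, 83, 89, 97, 101, 103, 107, 109, 113, 127, 131, 137, 139, 149, 151, 157, 163, 167, 173, 179, 181, 191, 193, 197, 199, 211, 223, 227, 229, 233, 239, 241, 251, 257, 263, 269, 271, 277, 281, 283, 293, 307, 311, 313, 317, 331, 337, 347, 349, 353, 359, 367, 373, 379, 383, 389, 397, 401, 409, 419, 421, 431, 433, 439, 443, 449, 457, 461, 463, 467, 479, 487, 491, 499]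
--     total = 0
--     value = 1
--     for k in range(len(primes)):
--         p = primes[k]
--         if p > N:
--             break
--         nxt = primes[k + 1] if k + 1 < len(primes) else N + 1
--         hi = min(N, nxt - 1)
--         total += value * (hi - p + 1)
--         value *= 2
--     return total
-- ===== Notes on version B (the rewrite author's own statement) =====
-- stated objective: faster
-- what changed: Replaces the O(N)-sized DP array and the per-index prime-membership scan with a single pass over the fixed prime table, adding value*segment_length for each piecewise-constant segment between consecutive primes.
import Mathlib
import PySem

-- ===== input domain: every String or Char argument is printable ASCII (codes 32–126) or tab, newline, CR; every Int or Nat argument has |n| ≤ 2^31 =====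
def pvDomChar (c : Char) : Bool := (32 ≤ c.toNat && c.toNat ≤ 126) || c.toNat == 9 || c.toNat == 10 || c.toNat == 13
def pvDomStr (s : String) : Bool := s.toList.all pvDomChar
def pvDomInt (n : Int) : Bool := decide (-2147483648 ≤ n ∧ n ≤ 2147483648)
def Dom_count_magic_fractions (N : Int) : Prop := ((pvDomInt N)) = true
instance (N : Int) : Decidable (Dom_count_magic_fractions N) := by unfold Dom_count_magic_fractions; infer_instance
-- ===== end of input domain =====

-- B replaces A's O(N)-sized DP array with one pass over the prime table,
-- summing value*segment_length per piecewise-constant segment (faster, asymptotic).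


-- ===== PORT A =====
-- the literal prime table shared by both Pythons
def pvPrimes : List Int := [2, 3, 5, 7, 11, 13, 17, 19, 23, 29, 31, 37, 41, 43, 47, 53, 59, 61, 67, 71, 73, 79, 83, 89, 97, 101, 103, 107, 109, 113, 127, 131, 137, 139, 149, 151, 157, 163, 167, 173, 179, 181, 191, 193, 197, 199, 211, 223, 227, 229, 233, 239, 241, 251, 257, 263, 269, 271, 277, 281, 283, 293, 307, 311, 313, 317, 331, 337, 347, 349, 353, 359, 367, 373, 379, 383, 389, 397, 401, 409, 419, 421, 431, 433, 439, 443, 449, 457, 461, 463, 467, 479, 487, 491, 499]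

-- loop body of A: ans[i] = ans[i-1]*2 if i in primes else ans[i-1]
-- (indices i and i-1 are always in range for the inputs the loop visits)
def pvStepA (ans : List Int) (i : Int) : List Int :=
  if i ∈ pvPrimes then PySem.List.pySetD ans i (PySem.List.pyGetD ans (i - 1) 0 * 2)
  else PySem.List.pySetD ans i (PySem.List.pyGetD ans (i - 1) 0)

def count_magic_fractions (N : Int) : Int :=
  -- ans = [0] * (N + 1): Python repeats max(0, N+1) times, exactly (N+1).toNat
  let ans : List Int := List.replicate (N + 1).toNat 0
  let ans :=
    if N > 1 then
      (PySem.List.pyRange 3 (N + 1) 1).foldl pvStepA (PySem.List.pySetD ans 2 1)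
    else ans
  ans.sum

-- ===== PORT B =====
-- Source B's for-loop with break, as structural recursion over the prime table
def pvAltGo (N : Int) (value : Int) : List Int → Int
  | [] => 0
  | p :: rest =>
    if p > N then 0
    else
      let nxt := match rest with | [] => N + 1 | q :: _ => q
      let hi := min N (nxt - 1)
      value * (hi - p + 1) + pvAltGo N (value * 2) rest

def count_magic_fractions_alt (N : Int) : Int := pvAltGo N 1 pvPrimes

-- ===== PRECONDITION & SPEC =====
def Spec_count_magic_fractions (N : Int) (out : Int) : Prop := out = count_magic_fractions_alt N
instance (N : Int) (out : Int) : Decidable (Spec_count_magic_fractions N out) := by unfold Spec_count_magic_fractions; infer_instance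

-- ===== CLAIM (what is proved, stated in full; the proofs are below) =====
def Claim_equal_count_magic_fractions : Prop := ∀ (N : Int), Dom_count_magic_fractions N → Spec_count_magic_fractions N (count_magic_fractions N)

-- ===== LEMMAS AND PROOFS =====

-- per-index value of A's DP array: 2^(number of table primes ≤ i, minus 1)
def pvVal (i : Int) : Int := 2 ^ (pvPrimes.countP (fun p => decide (p ≤ i)) - 1)

theorem pv_sorted : pvPrimes.Pairwise (· < ·) := by decide

theorem pv_nodup : pvPrimes.Nodup := List.Pairwise.nodup pv_sorted

-- split an Icc-sum at an interior point
theorem pv_sum_Icc_split (f : Int → Int) (a b c : Int) (h1 : a ≤ b) (h2 : b ≤ c) :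
    (∑ i ∈ Finset.Icc a c, f i) = (∑ i ∈ Finset.Icc a b, f i) + ∑ i ∈ Finset.Icc (b + 1) c, f i := by
  have hu : Finset.Icc a c = Finset.Icc a b ∪ Finset.Icc (b + 1) c := by
    ext x; simp only [Finset.mem_union, Finset.mem_Icc]; omega
  rw [hu, Finset.sum_union]
  rw [Finset.disjoint_left]
  intro x hx hx'
  simp only [Finset.mem_Icc] at hx hx'
  omega

-- B-side characterisation
theorem pvAltGo_spec (l : List Int) (hl : l.Pairwise (· < ·)) (N v : Int) :
    pvAltGo N v l = ∑ i ∈ Finset.Icc (l.headD (N + 1)) N,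
      v * 2 ^ (l.countP (fun p => decide (p ≤ i)) - 1) := by
  induction l generalizing v with
  | nil =>
    rw [List.headD_nil, Finset.Icc_eq_empty (by omega), Finset.sum_empty, pvAltGo]
  | cons p rest ih =>
    rw [List.pairwise_cons] at hl
    obtain ⟨hp, hrest⟩ := hl
    rw [List.headD_cons]
    by_cases hpN : p > N
    · rw [Finset.Icc_eq_empty (by omega), Finset.sum_empty]
      simp only [pvAltGo]
      rw [if_pos hpN]
    · cases rest with
      | nil =>
        have hstep : pvAltGo N v [p] = v * (min N (N + 1 - 1) - p + 1) + pvAltGo N (v * 2) [] := by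
          simp only [pvAltGo]
          rw [if_neg hpN]
        rw [hstep, pvAltGo]
        have hsum : ∑ i ∈ Finset.Icc p N,
            v * 2 ^ (List.countP (fun q => decide (q ≤ i)) [p] - 1)
            = ∑ _i ∈ Finset.Icc p N, v := by
          apply Finset.sum_congr rfl
          intro i hi
          rw [Finset.mem_Icc] at hi
          rw [List.countP_cons, List.countP_nil]
          have : decide (p ≤ i) = true := by simpa using hi.1
          rw [this]
          simp
        rw [hsum, Finset.sum_const, nsmul_eq_mul, Int.card_Icc,
          Int.toNat_of_nonneg (by omega)]
        have : min N (N + 1 - 1) = N := by omega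
        rw [this]
        ring
      | cons q t =>
        have hpq : p < q := hp q (by simp)
        have hqt : ∀ x ∈ t, q < x := (List.pairwise_cons.mp hrest).1
        have hstep : pvAltGo N v (p :: q :: t)
            = v * (min N (q - 1) - p + 1) + pvAltGo N (v * 2) (q :: t) := by
          simp only [pvAltGo]
          rw [if_neg hpN]
        rw [hstep, ih hrest (v * 2), List.headD_cons]
        by_cases hqN : q ≤ N
        · rw [pv_sum_Icc_split _ p (q - 1) N (by omega) (by omega)]
          have h1 : ∑ i ∈ Finset.Icc p (q - 1),
              v * 2 ^ (List.countP (fun r => decide (r ≤ i)) (p :: q :: t) - 1)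
              = ∑ _i ∈ Finset.Icc p (q - 1), v := by
            apply Finset.sum_congr rfl
            intro i hi
            rw [Finset.mem_Icc] at hi
            have hz : List.countP (fun r => decide (r ≤ i)) (q :: t) = 0 := by
              rw [List.countP_eq_zero]
              intro x hx
              rcases List.mem_cons.mp hx with h | h
              · subst h; simp only [decide_eq_true_eq]; omega
              · have := hqt x h; simp only [decide_eq_true_eq]; omega
            rw [List.countP_cons, hz]
            have : decide (p ≤ i) = true := by simpa using hi.1
            rw [this]
            simp
          have h2 : ∑ i ∈ Finset.Icc (q - 1 + 1) N,
              v * 2 ^ (List.countP (fun r => decide (r ≤ i)) (p :: q :: t) - 1)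
              = ∑ i ∈ Finset.Icc q N,
                v * 2 * 2 ^ (List.countP (fun r => decide (r ≤ i)) (q :: t) - 1) := by
            rw [show q - 1 + 1 = q from by ring]
            apply Finset.sum_congr rfl
            intro i hi
            rw [Finset.mem_Icc] at hi
            have hcq : 0 < List.countP (fun r => decide (r ≤ i)) (q :: t) := by
              rw [List.countP_pos_iff]
              exact ⟨q, by simp, by simpa using hi.1⟩
            obtain ⟨c, hc⟩ : ∃ c, List.countP (fun r => decide (r ≤ i)) (q :: t) = c + 1 :=
              ⟨_, (Nat.succ_pred_eq_of_pos hcq).symm⟩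
            rw [List.countP_cons, hc]
            have : decide (p ≤ i) = true := by simp only [decide_eq_true_eq]; omega
            rw [this]
            simp only [if_true, Nat.add_sub_cancel]
            rw [pow_succ]
            ring
          rw [h1, h2, Finset.sum_const, nsmul_eq_mul, Int.card_Icc,
            Int.toNat_of_nonneg (by omega)]
          have : min N (q - 1) = q - 1 := by omega
          rw [this]
          ring
        · rw [Finset.Icc_eq_empty (by omega : ¬ q ≤ N), Finset.sum_empty, add_zero]
          have h1 : ∑ i ∈ Finset.Icc p N,
              v * 2 ^ (List.countP (fun r => decide (r ≤ i)) (p :: q :: t) - 1)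
              = ∑ _i ∈ Finset.Icc p N, v := by
            apply Finset.sum_congr rfl
            intro i hi
            rw [Finset.mem_Icc] at hi
            have hz : List.countP (fun r => decide (r ≤ i)) (q :: t) = 0 := by
              rw [List.countP_eq_zero]
              intro x hx
              rcases List.mem_cons.mp hx with h | h
              · subst h; simp only [decide_eq_true_eq]; omega
              · have := hqt x h; simp only [decide_eq_true_eq]; omega
            rw [List.countP_cons, hz]
            have : decide (p ≤ i) = true := by simpa using hi.1
            rw [this]
            simp
          rw [h1, Finset.sum_const, nsmul_eq_mul, Int.card_Icc,
            Int.toNat_of_nonneg (by omega)]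
          have : min N (q - 1) = N := by omega
          rw [this]
          ring

-- counting ≤ k+1 versus ≤ k in a duplicate-free list
theorem pv_countP_succ (l : List Int) (hl : l.Nodup) (k : Int) :
    l.countP (fun p => decide (p ≤ k + 1))
      = l.countP (fun p => decide (p ≤ k)) + (if (k + 1) ∈ l then 1 else 0) := by
  induction l with
  | nil => simp
  | cons a t ih =>
    rw [List.nodup_cons] at hl
    simp only [List.countP_cons, List.mem_cons, ih hl.2]
    by_cases hak : a = k + 1
    · subst hak
      have hnt : (k + 1) ∉ t := hl.1
      simp only [hnt, if_true, true_or]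
      have h1 : decide ((k + 1 : Int) ≤ k + 1) = true := by simp
      have h2 : decide ((k + 1 : Int) ≤ k) = false := by simp
      rw [h1, h2]
      simp
    · have hor : ((k + 1) = a ∨ (k + 1) ∈ t) ↔ (k + 1) ∈ t := by
        constructor
        · rintro (h | h)
          · exact absurd h.symm hak
          · exact h
        · exact Or.inr
      rw [if_congr hor rfl rfl]
      by_cases h1 : a ≤ k
      · have : a ≤ k + 1 := by omega
        simp only [h1, this, decide_true, if_true]
        omega
      · have : ¬ a ≤ k + 1 := by omega
        simp only [h1, this, decide_false]
        omega

theorem pvVal_succ (k : Int) (hk : 2 ≤ k) :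
    pvVal (k + 1) = if (k + 1) ∈ pvPrimes then pvVal k * 2 else pvVal k := by
  have hc : 0 < pvPrimes.countP (fun p => decide (p ≤ k)) := by
    rw [List.countP_pos_iff]
    exact ⟨2, by decide, by simpa using hk⟩
  unfold pvVal
  rw [pv_countP_succ pvPrimes pv_nodup k]
  split_ifs with h
  · obtain ⟨c, hc'⟩ : ∃ c, pvPrimes.countP (fun p => decide (p ≤ k)) = c + 1 :=
      ⟨_, (Nat.succ_pred_eq_of_pos hc).symm⟩
    rw [hc']
    rw [show c + 1 + 1 - 1 = c + 1 from rfl, show c + 1 - 1 = c from rfl, pow_succ]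
  · simp

-- A-side loop invariant: after the iterations for 3..k the array holds pvVal j
-- at positions 2..k and 0 elsewhere, and its sum is the partial sum up to k
theorem pvFoldA_inv (N : Int) (hN : 2 ≤ N) (k : Int) (hk2 : 2 ≤ k) (hkN : k ≤ N) :
    ((PySem.List.pyRange 3 (k + 1) 1).foldl pvStepA
        (PySem.List.pySetD (List.replicate (N + 1).toNat 0) 2 1)).length = (N + 1).toNat ∧
    (∀ j : Int, 0 ≤ j → j ≤ N →
      PySem.List.pyGetD ((PySem.List.pyRange 3 (k + 1) 1).foldl pvStepA
        (PySem.List.pySetD (List.replicate (N + 1).toNat 0) 2 1)) j 0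
        = if 2 ≤ j ∧ j ≤ k then pvVal j else 0) ∧
    ((PySem.List.pyRange 3 (k + 1) 1).foldl pvStepA
        (PySem.List.pySetD (List.replicate (N + 1).toNat 0) 2 1)).sum
      = ∑ i ∈ Finset.Icc 2 k, pvVal i := by
  revert hkN
  induction k, hk2 using Int.le_induction with
  | base =>
    intro _
    rw [show (2 : Int) + 1 = 3 from rfl, PySem.List.pyRange_one_eq_nil le_rfl, List.foldl_nil]
    rw [PySem.List.pySetD_of_nonneg _ _ (by omega), show ((2 : Int)).toNat = 2 from rfl]
    refine ⟨by rw [List.length_set, List.length_replicate], ?_, ?_⟩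
    · intro j hj0 hjN
      rw [PySem.List.pyGetD_eq_getElem _ _ hj0
        (by rw [List.length_set, List.length_replicate]; omega)]
      rw [List.getElem_set]
      by_cases hj2 : j = 2
      · subst hj2
        rw [if_pos (show (2 : ℕ) = Int.toNat 2 from rfl), if_pos ⟨le_rfl, le_rfl⟩,
          show pvVal 2 = 1 from by decide]
      · rw [if_neg (by omega), List.getElem_replicate]
        rw [if_neg (by omega)]
    · rw [List.sum_set', dif_pos (by rw [List.length_replicate]; omega)]
      rw [List.getElem_replicate, List.sum_replicate, smul_zero]
      rw [Finset.Icc_self, Finset.sum_singleton, show pvVal 2 = 1 from by decide]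
      ring
  | succ k hk ih =>
    intro hkN
    obtain ⟨hlen, hget, hsum⟩ := ih (by omega)
    rw [PySem.List.pyRange_one_succ_right (by omega : (3 : Int) ≤ k + 1), List.foldl_append,
      List.foldl_cons, List.foldl_nil]
    set L := (PySem.List.pyRange 3 (k + 1) 1).foldl pvStepA
      (PySem.List.pySetD (List.replicate (N + 1).toNat 0) 2 1) with hLdef
    have hgetk : PySem.List.pyGetD L k 0 = pvVal k := by
      rw [hget k (by omega) (by omega), if_pos ⟨hk, le_rfl⟩]
    have hL1 : pvStepA L (k + 1) = PySem.List.pySetD L (k + 1) (pvVal (k + 1)) := by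
      unfold pvStepA
      rw [show k + 1 - 1 = k from by ring, hgetk, pvVal_succ k hk]
      split_ifs <;> rfl
    have hnlt : (k + 1).toNat < L.length := by rw [hlen]; omega
    have hset : pvStepA L (k + 1) = L.set (k + 1).toNat (pvVal (k + 1)) := by
      rw [hL1, PySem.List.pySetD_of_nonneg _ _ (by omega)]
    have hgetk1 : L[(k + 1).toNat]'hnlt = 0 := by
      rw [← PySem.List.pyGetD_eq_getElem L 0 (by omega) (by rw [hlen]; omega),
        hget (k + 1) (by omega) (by omega), if_neg (by omega)]
    refine ⟨?_, ?_, ?_⟩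
    · rw [hset, List.length_set, hlen]
    · intro j hj0 hjN
      rw [hset, PySem.List.pyGetD_eq_getElem _ _ hj0
        (by rw [List.length_set, hlen]; omega), List.getElem_set]
      by_cases hjk : j = k + 1
      · subst hjk
        rw [if_pos (by omega), if_pos ⟨by omega, le_rfl⟩]
      · rw [if_neg (by omega), ← PySem.List.pyGetD_eq_getElem L 0 hj0 (by rw [hlen]; omega),
          hget j hj0 hjN]
        split_ifs <;> first | rfl | omega
    · rw [hset, List.sum_set', dif_pos hnlt, hgetk1, hsum,
        pv_sum_Icc_split pvVal 2 k (k + 1) hk (by omega), Finset.Icc_self,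
        Finset.sum_singleton]
      ring

-- ===== VERDICT (by name: the statement is the Claim_ definition above) =====
set_option maxRecDepth 4000 in
theorem count_magic_fractions_spec : Claim_equal_count_magic_fractions := by
  intro N _
  unfold Spec_count_magic_fractions count_magic_fractions count_magic_fractions_alt
  by_cases hN : N > 1
  · simp only [if_pos hN]
    obtain ⟨-, -, hsum⟩ := pvFoldA_inv N (by omega) N (by omega) le_rfl
    rw [hsum, pvAltGo_spec pvPrimes pv_sorted N 1,
      show pvPrimes.headD (N + 1) = 2 from rfl]
    apply Finset.sum_congr rfl
    intro i _
    rw [one_mul]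
    rfl
  · simp only [if_neg hN]
    rw [List.sum_replicate, smul_zero]
    have h0 : pvAltGo N 1 pvPrimes = 0 := by
      unfold pvPrimes
      simp only [pvAltGo]
      rw [if_pos (by omega : (2 : Int) > N)]
    rw [h0]
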